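-- pv_equiv track=rewrite | github.com/enochliu98/RainbowArena | rainbowarena/games/papayoo/judger.py | judge_dun_winner
-- ===== SOURCE A (Python) =====
-- def judge_dun_winner(dun_cards, dun_color):
--     """
--     当前墩胜利者判断
--     标准：
--     color为dun_color的最大牌
--     A最大，2最小
--     """
--     winner_id = -1  # 赢家id
--     winner_card = -1  # 赢家的牌
--
--     for dun_card in dun_cards:
--         if winner_id == -1:
--             winner_id = dun_card[0]
--             winner_card = dun_card[1]
--         else:
--             card_color = dun_card[1] % 4 if dun_card[1] < 40 else 4
--             if card_color == dun_color:
--                 card_value = dun_card[1] // 4 if dun_card[1] < 40 else dun_card[1] - 40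
--                 winner_value = winner_card // 4 if winner_card < 40 else winner_card - 40
--                 if card_value > winner_value:
--                     winner_id = dun_card[0]
--                     winner_card = dun_card[1]
--
--     return winner_id
-- ===== SOURCE B (Python) =====
-- def judge_dun_winner(dun_cards, dun_color):
--     """Trick winner: stably sort the candidate cards (lead card + cards of the
--     led color) by rank descending; the head of the ranking wins (stability
--     keeps the earliest card first among equal ranks)."""
--     if not dun_cards:
--         return -1
--
--     def rank(c):
--         return c[1] // 4 if c[1] < 40 else c[1] - 40
--
--     def follows(c):
--         return (c[1] % 4 if c[1] < 40 else 4) == dun_color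
--
--     candidates = [dun_cards[0]] + [c for c in dun_cards[1:] if follows(c)]
--     ranking = sorted(candidates, key=rank, reverse=True)
--     return ranking[0][0]
-- ===== Notes on version B (the rewrite author's own statement) =====
-- stated objective: alternative
-- what changed: A's fused sentinel-state running-argmax loop is replaced by building the candidate list and stably sorting it by rank descending, returning the head of the ranking (stability gives A's strict-> first-wins tie-breaking).
-- outside the precondition, e.g. on judge_dun_winner([(-1, 5), (2, 0)], 3): A returns 2, B returns -1
import Mathlib
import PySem

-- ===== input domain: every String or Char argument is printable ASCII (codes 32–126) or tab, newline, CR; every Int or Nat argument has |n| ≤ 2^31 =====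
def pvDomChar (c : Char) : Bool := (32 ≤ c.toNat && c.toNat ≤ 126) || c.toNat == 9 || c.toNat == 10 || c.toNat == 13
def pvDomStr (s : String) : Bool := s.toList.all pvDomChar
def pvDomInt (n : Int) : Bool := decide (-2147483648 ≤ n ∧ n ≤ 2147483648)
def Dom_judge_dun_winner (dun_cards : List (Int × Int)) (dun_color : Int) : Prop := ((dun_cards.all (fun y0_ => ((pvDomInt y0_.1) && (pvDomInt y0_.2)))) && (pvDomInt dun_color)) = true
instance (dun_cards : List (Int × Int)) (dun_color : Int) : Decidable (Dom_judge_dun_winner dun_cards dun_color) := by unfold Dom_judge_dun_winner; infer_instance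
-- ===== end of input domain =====

-- B replaces A's fused sentinel-state running-argmax loop by building the candidate list and
-- stably sorting it by rank descending, returning the head of the ranking; alternative algorithm.


-- ===== PORT A =====
def judge_dun_winner (dun_cards : List (Int × Int)) (dun_color : Int) : Int :=
  (dun_cards.foldl
    (fun (st : Int × Int) dun_card =>
      if st.1 = -1 then (dun_card.1, dun_card.2)
      else
        let card_color := if dun_card.2 < 40 then PySem.Int.mod dun_card.2 4 else 4
        if card_color = dun_color then
          let card_value := if dun_card.2 < 40 then PySem.Int.floordiv dun_card.2 4 else dun_card.2 - 40
          let winner_value := if st.2 < 40 then PySem.Int.floordiv st.2 4 else st.2 - 40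
          if winner_value < card_value then (dun_card.1, dun_card.2) else st
        else st)
    (-1, -1)).1

-- ===== PORT B =====
def pvRankB (c : Int × Int) : Int := if c.2 < 40 then PySem.Int.floordiv c.2 4 else c.2 - 40
def pvFollowsB (dun_color : Int) (c : Int × Int) : Bool :=
  (if c.2 < 40 then PySem.Int.mod c.2 4 else 4) = dun_color

def judge_dun_winner_alt (dun_cards : List (Int × Int)) (dun_color : Int) : Int :=
  match dun_cards with
  | [] => -1
  | c0 :: rest =>
    let candidates := c0 :: rest.filter (pvFollowsB dun_color)
    match PySem.List.sorted candidates pvRankB true with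
    | [] => -1  -- unreachable: candidates is nonempty
    | w :: _ => w.1

-- ===== PRECONDITION & SPEC =====
-- Pre_ restricts to the natural domain of player ids: it excludes tricks containing the
-- out-of-domain player id -1, which collides with A's winner_id sentinel and makes A
-- discard the running winner.
def Pre_judge_dun_winner (dun_cards : List (Int × Int)) (dun_color : Int) : Prop :=
  ∀ c ∈ dun_cards, c.1 ≠ -1
instance (dun_cards : List (Int × Int)) (dun_color : Int) : Decidable (Pre_judge_dun_winner dun_cards dun_color) := by unfold Pre_judge_dun_winner; infer_instance

def pvWitness_judge_dun_winner : (List (Int × Int)) × Int := ([(0, 5), (1, 41), (2, 7)], 1)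

def Spec_judge_dun_winner (dun_cards : List (Int × Int)) (dun_color : Int) (out : Int) : Prop := out = judge_dun_winner_alt dun_cards dun_color
instance (dun_cards : List (Int × Int)) (dun_color : Int) (out : Int) : Decidable (Spec_judge_dun_winner dun_cards dun_color out) := by unfold Spec_judge_dun_winner; infer_instance

-- ===== CLAIM (what is proved, stated in full; the proofs are below) =====
def Claim_equal_judge_dun_winner : Prop := ∀ (dun_cards : List (Int × Int)) (dun_color : Int), Dom_judge_dun_winner dun_cards dun_color → Pre_judge_dun_winner dun_cards dun_color → Spec_judge_dun_winner dun_cards dun_color (judge_dun_winner dun_cards dun_color)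

-- ===== LEMMAS AND PROOFS =====

-- Inserting into a nonempty descending accumulator: the new head is the running first-argmax step.
theorem head_foldl_insertBy (cs : List (Int × Int)) :
    ∀ (a : Int × Int) (t : List (Int × Int)),
    (cs.foldl (fun acc x => PySem.List.insertBy (fun p q => decide (pvRankB q < pvRankB p)) x acc) (a :: t)).head? =
      some (cs.foldl (fun m x => if pvRankB m < pvRankB x then x else m) a) := by
  induction cs with
  | nil => intro a t; rfl
  | cons x cs ih =>
    intro a t
    simp only [List.foldl_cons, PySem.List.insertBy]
    by_cases h : pvRankB a < pvRankB x
    · simp only [h, decide_true, if_true]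
      exact ih x (a :: t)
    · simp only [h, decide_false, Bool.false_eq_true, if_false]
      exact ih a _

-- Head of the stable descending sort of a nonempty list = the running first-argmax fold.
theorem sorted_rev_head (w : Int × Int) (cs : List (Int × Int)) :
    (PySem.List.sorted (w :: cs) pvRankB true).head? =
      some (cs.foldl (fun m x => if pvRankB m < pvRankB x then x else m) w) := by
  rw [PySem.List.sorted_rev_eq_foldl_insertBy]
  simp only [List.foldl_cons]
  exact head_foldl_insertBy cs w []

-- Core invariant: once the running winner has id ≠ -1, A's fused loop equals the
-- first-argmax fold over the color-filtered candidates.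
theorem loop_eq (dun_color : Int) (rest : List (Int × Int)) :
    ∀ (w : Int × Int), w.1 ≠ -1 → (∀ c ∈ rest, c.1 ≠ -1) →
    rest.foldl
      (fun (st : Int × Int) dun_card =>
        if st.1 = -1 then dun_card
        else
          if (if dun_card.2 < 40 then PySem.Int.mod dun_card.2 4 else 4) = dun_color then
            if (if st.2 < 40 then PySem.Int.floordiv st.2 4 else st.2 - 40) <
                (if dun_card.2 < 40 then PySem.Int.floordiv dun_card.2 4 else dun_card.2 - 40) then
              dun_card
            else st
          else st) w
    = (rest.filter (pvFollowsB dun_color)).foldl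
        (fun m x => if pvRankB m < pvRankB x then x else m) w := by
  induction rest with
  | nil => intro w _ _; rfl
  | cons c t ih =>
    intro w hw hrest
    have hc1 : c.1 ≠ -1 := hrest c (List.mem_cons_self)
    have ht : ∀ x ∈ t, x.1 ≠ -1 := fun x hx => hrest x (List.mem_cons_of_mem _ hx)
    simp only [List.foldl_cons, List.filter_cons, if_neg hw, pvFollowsB, pvRankB]
    by_cases hc : (if c.2 < 40 then PySem.Int.mod c.2 4 else 4) = dun_color
    · simp only [hc, decide_true, if_true, List.foldl_cons]
      by_cases hv : (if w.2 < 40 then PySem.Int.floordiv w.2 4 else w.2 - 40) <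
          (if c.2 < 40 then PySem.Int.floordiv c.2 4 else c.2 - 40)
      · simp only [if_pos hv]
        exact ih c hc1 ht
      · simp only [if_neg hv]
        exact ih w hw ht
    · simp only [hc, decide_false, if_false]
      exact ih w hw ht

-- ===== VERDICT (by name: the statement is the Claim_ definition above) =====
theorem judge_dun_winner_spec : Claim_equal_judge_dun_winner := by
  intro dun_cards dun_color _ hpre
  unfold Spec_judge_dun_winner judge_dun_winner judge_dun_winner_alt
  match dun_cards with
  | [] => rfl
  | c0 :: rest =>
    simp only [List.foldl_cons, Prod.mk.eta, if_true]
    rw [loop_eq dun_color rest c0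
      (hpre c0 (List.mem_cons_self))
      (fun x hx => hpre x (List.mem_cons_of_mem _ hx))]
    have h := sorted_rev_head c0 (rest.filter (pvFollowsB dun_color))
    cases hs : PySem.List.sorted (c0 :: rest.filter (pvFollowsB dun_color)) pvRankB true with
    | nil => rw [hs] at h; simp at h
    | cons w ws =>
      rw [hs] at h
      simp only [List.head?] at h
      injection h with h
      simp [h]
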